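-- pv_equiv track=rewrite | github.com/dhelfrich/AdventOfCode2023 | Day17/day17.py | getNeighbors3
-- ===== SOURCE A (Python) =====
-- def getNeighbors3(grid, node):
--     rows = len(grid)
--     cols = len(grid[0])
--     i, j, t = node
--     neighbors = []
--     displacements = [(-3, 0), (-2, 0), (-1, 0), (1, 0), (2, 0), (3, 0),
--                      (0, -3), (0, -2), (0, -1), (0, 1), (0, 2), (0, 3)]
--     di, dj = displacements[t]
--     if i > 0 and di != -3 and di <= 0:
--         if di < 0:
--             neighbors.append(((i - 1, j), (di - 1, 0)))
--         else:
--             neighbors.append(((i - 1, j), (-1, 0)))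
--     if i < rows - 1 and di != 3 and di >= 0:
--         if di > 0:
--             neighbors.append(((i + 1, j), (di + 1, 0)))
--         else:
--             neighbors.append(((i + 1, j), (1, 0)))
--     if j > 0 and dj != -3 and dj <= 0:
--         if dj < 0:
--             neighbors.append(((i, j - 1), (0, dj - 1)))
--         else:
--             neighbors.append(((i, j - 1), (0, -1)))
--     if j < cols - 1 and dj != 3 and dj >= 0:
--         if dj > 0:
--             neighbors.append(((i, j + 1), (0, dj + 1)))
--         else:
--             neighbors.append(((i, j + 1), (0, 1)))
--     neighbors2 = []
--     for ((i, j), (di, dj)) in neighbors: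
--         neighbors2.append((i, j, displacements.index((di, dj))))
--     return neighbors2
-- ===== SOURCE B (Python) =====
-- # Static transition table: TRANS[t] lists (bound_tag, di, dj, new_t) with
-- # tags 0=up, 1=down, 2=left, 3=right, in the original up/down/left/right order.
-- TRANS = [
--     [(2, 0, -1, 8), (3, 0, 1, 9)],
--     [(0, -1, 0, 0), (2, 0, -1, 8), (3, 0, 1, 9)],
--     [(0, -1, 0, 1), (2, 0, -1, 8), (3, 0, 1, 9)],
--     [(1, 1, 0, 4), (2, 0, -1, 8), (3, 0, 1, 9)],
--     [(1, 1, 0, 5), (2, 0, -1, 8), (3, 0, 1, 9)],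
--     [(2, 0, -1, 8), (3, 0, 1, 9)],
--     [(0, -1, 0, 2), (1, 1, 0, 3)],
--     [(0, -1, 0, 2), (1, 1, 0, 3), (2, 0, -1, 6)],
--     [(0, -1, 0, 2), (1, 1, 0, 3), (2, 0, -1, 7)],
--     [(0, -1, 0, 2), (1, 1, 0, 3), (3, 0, 1, 10)],
--     [(0, -1, 0, 2), (1, 1, 0, 3), (3, 0, 1, 11)],
--     [(0, -1, 0, 2), (1, 1, 0, 3)],
-- ]
--
--
-- def getNeighbors3(grid, node):
--     rows = len(grid)
--     cols = len(grid[0])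
--     i, j, t = node
--     out = []
--     for tag, di, dj, nt in TRANS[t]:
--         if (i > 0 if tag == 0 else
--                 i < rows - 1 if tag == 1 else
--                 j > 0 if tag == 2 else
--                 j < cols - 1):
--             out.append((i + di, j + dj, nt))
--     return out
-- ===== Notes on version B (the rewrite author's own statement) =====
-- stated objective: alternative
-- what changed: Replaces the four unrolled bound-checked if/append blocks and the trailing displacements.index list-scan pass with a single filtered fold over a precomputed static transition table TRANS[t] of (bound_tag, di, dj, new_t) entries, so the successor displacement index is read from the table instead of recomputed by .index.
import Mathlib
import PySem

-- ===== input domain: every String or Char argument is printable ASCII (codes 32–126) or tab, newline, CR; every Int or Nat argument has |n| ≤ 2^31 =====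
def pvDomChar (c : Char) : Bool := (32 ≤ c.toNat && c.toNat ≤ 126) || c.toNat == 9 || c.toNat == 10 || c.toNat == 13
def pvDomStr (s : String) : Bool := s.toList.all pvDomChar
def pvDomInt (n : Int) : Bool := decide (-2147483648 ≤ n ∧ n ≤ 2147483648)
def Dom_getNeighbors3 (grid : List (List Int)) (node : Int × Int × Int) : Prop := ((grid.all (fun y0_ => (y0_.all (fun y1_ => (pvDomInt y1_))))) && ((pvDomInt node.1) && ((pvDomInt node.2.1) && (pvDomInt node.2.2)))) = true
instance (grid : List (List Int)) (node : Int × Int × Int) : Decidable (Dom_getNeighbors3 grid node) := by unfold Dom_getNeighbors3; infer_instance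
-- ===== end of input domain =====

-- B replaces A's four unrolled if/append blocks and the trailing displacements.index pass
-- by one fold over a precomputed static transition table (objective: alternative/simpler).

-- ===== PORT A =====
def getNeighbors3 (grid : List (List Int)) (node : Int × Int × Int) : List (Int × Int × Int) :=
  let rows : Int := (grid.length : Int)
  let cols : Int := (((PySem.List.pyGet? grid 0).getD []).length : Int)
  let i := node.1
  let j := node.2.1
  let t := node.2.2
  let displacements : List (Int × Int) :=
    [(-3,0),(-2,0),(-1,0),(1,0),(2,0),(3,0),(0,-3),(0,-2),(0,-1),(0,1),(0,2),(0,3)]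
  let dd := (PySem.List.pyGet? displacements t).getD (0, 0)
  let di := dd.1
  let dj := dd.2
  let neighbors : List ((Int × Int) × (Int × Int)) := []
  let neighbors := if i > 0 ∧ di ≠ -3 ∧ di ≤ 0 then
      neighbors ++ [if di < 0 then ((i - 1, j), (di - 1, 0)) else ((i - 1, j), (-1, 0))]
    else neighbors
  let neighbors := if i < rows - 1 ∧ di ≠ 3 ∧ di ≥ 0 then
      neighbors ++ [if di > 0 then ((i + 1, j), (di + 1, 0)) else ((i + 1, j), (1, 0))]
    else neighbors
  let neighbors := if j > 0 ∧ dj ≠ -3 ∧ dj ≤ 0 then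
      neighbors ++ [if dj < 0 then ((i, j - 1), (0, dj - 1)) else ((i, j - 1), (0, -1))]
    else neighbors
  let neighbors := if j < cols - 1 ∧ dj ≠ 3 ∧ dj ≥ 0 then
      neighbors ++ [if dj > 0 then ((i, j + 1), (0, dj + 1)) else ((i, j + 1), (0, 1))]
    else neighbors
  neighbors.foldl
    (fun acc p =>
      acc ++ [(p.1.1, p.1.2, (((PySem.List.index? displacements p.2).getD 0 : Nat) : Int))]) []

-- ===== PORT B =====
-- Static transition table: pvTRANS[t] lists (bound_tag, di, dj, new_t),
-- tags 0=up, 1=down, 2=left, 3=right, in the original up/down/left/right order.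
def pvTRANS : List (List (Nat × Int × Int × Int)) :=
  [ [(2, 0, -1, 8), (3, 0, 1, 9)],
    [(0, -1, 0, 0), (2, 0, -1, 8), (3, 0, 1, 9)],
    [(0, -1, 0, 1), (2, 0, -1, 8), (3, 0, 1, 9)],
    [(1, 1, 0, 4), (2, 0, -1, 8), (3, 0, 1, 9)],
    [(1, 1, 0, 5), (2, 0, -1, 8), (3, 0, 1, 9)],
    [(2, 0, -1, 8), (3, 0, 1, 9)],
    [(0, -1, 0, 2), (1, 1, 0, 3)],
    [(0, -1, 0, 2), (1, 1, 0, 3), (2, 0, -1, 6)],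
    [(0, -1, 0, 2), (1, 1, 0, 3), (2, 0, -1, 7)],
    [(0, -1, 0, 2), (1, 1, 0, 3), (3, 0, 1, 10)],
    [(0, -1, 0, 2), (1, 1, 0, 3), (3, 0, 1, 11)],
    [(0, -1, 0, 2), (1, 1, 0, 3)] ]

def getNeighbors3_alt (grid : List (List Int)) (node : Int × Int × Int) : List (Int × Int × Int) :=
  let rows : Int := (grid.length : Int)
  let cols : Int := (((PySem.List.pyGet? grid 0).getD []).length : Int)
  let i := node.1
  let j := node.2.1
  let t := node.2.2
  ((PySem.List.pyGet? pvTRANS t).getD []).foldl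
    (fun acc e =>
      let ok : Bool :=
        match e.1 with
        | 0 => decide (i > 0)
        | 1 => decide (i < rows - 1)
        | 2 => decide (j > 0)
        | _ => decide (j < cols - 1)
      if ok then acc ++ [(i + e.2.1, j + e.2.2.1, e.2.2.2)] else acc) []

-- ===== PRECONDITION & SPEC =====
-- Pre_ excludes exactly the inputs where A raises: grid = [] (IndexError on grid[0])
-- and t outside the Python index range -12 ≤ t < 12 (IndexError on displacements[t]).
def Pre_getNeighbors3 (grid : List (List Int)) (node : Int × Int × Int) : Prop :=
  grid ≠ [] ∧ -12 ≤ node.2.2 ∧ node.2.2 < 12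
instance (grid : List (List Int)) (node : Int × Int × Int) : Decidable (Pre_getNeighbors3 grid node) := by unfold Pre_getNeighbors3; infer_instance

def pvWitness_getNeighbors3 : List (List Int) × (Int × Int × Int) := ([[1, 2], [3, 4]], (1, 0, 9))

def Spec_getNeighbors3 (grid : List (List Int)) (node : Int × Int × Int) (out : List (Int × Int × Int)) : Prop := out = getNeighbors3_alt grid node
instance (grid : List (List Int)) (node : Int × Int × Int) (out : List (Int × Int × Int)) : Decidable (Spec_getNeighbors3 grid node out) := by unfold Spec_getNeighbors3; infer_instance

-- ===== CLAIM (what is proved, stated in full; the proofs are below) =====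
def Claim_equal_getNeighbors3 : Prop := ∀ (grid : List (List Int)) (node : Int × Int × Int), Dom_getNeighbors3 grid node → Pre_getNeighbors3 grid node → Spec_getNeighbors3 grid node (getNeighbors3 grid node)

-- ===== LEMMAS AND PROOFS =====

-- ===== VERDICT (by name: the statement is the Claim_ definition above) =====
set_option maxHeartbeats 2000000 in
theorem getNeighbors3_spec : Claim_equal_getNeighbors3 := by
  intro grid node _ hpre
  obtain ⟨i, j, t⟩ := node
  obtain ⟨hg, hlo, hhi⟩ := hpre
  simp only at hlo hhi
  unfold Spec_getNeighbors3
  interval_cases t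
  · have h1 : (PySem.List.pyGet? [((-3:Int),(0:Int)),(-2,0),(-1,0),(1,0),(2,0),(3,0),(0,-3),(0,-2),(0,-1),(0,1),(0,2),(0,3)] (-12:Int)) = some (-3, 0) := by decide
    have h2 : (PySem.List.pyGet? pvTRANS (-12:Int)) = some [(2, 0, -1, 8), (3, 0, 1, 9)] := by decide
    simp only [getNeighbors3, getNeighbors3_alt, h1, h2, Option.getD_some, List.foldl]
    norm_num
    split_ifs <;> (try norm_num [List.idxOf?, List.findIdx?, List.findIdx?.go]) <;> omega
  · have h1 : (PySem.List.pyGet? [((-3:Int),(0:Int)),(-2,0),(-1,0),(1,0),(2,0),(3,0),(0,-3),(0,-2),(0,-1),(0,1),(0,2),(0,3)] (-11:Int)) = some (-2, 0) := by decide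
    have h2 : (PySem.List.pyGet? pvTRANS (-11:Int)) = some [(0, -1, 0, 0), (2, 0, -1, 8), (3, 0, 1, 9)] := by decide
    simp only [getNeighbors3, getNeighbors3_alt, h1, h2, Option.getD_some, List.foldl]
    norm_num
    split_ifs <;> (try norm_num [List.idxOf?, List.findIdx?, List.findIdx?.go]) <;> omega
  · have h1 : (PySem.List.pyGet? [((-3:Int),(0:Int)),(-2,0),(-1,0),(1,0),(2,0),(3,0),(0,-3),(0,-2),(0,-1),(0,1),(0,2),(0,3)] (-10:Int)) = some (-1, 0) := by decide
    have h2 : (PySem.List.pyGet? pvTRANS (-10:Int)) = some [(0, -1, 0, 1), (2, 0, -1, 8), (3, 0, 1, 9)] := by decide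
    simp only [getNeighbors3, getNeighbors3_alt, h1, h2, Option.getD_some, List.foldl]
    norm_num
    split_ifs <;> (try norm_num [List.idxOf?, List.findIdx?, List.findIdx?.go]) <;> omega
  · have h1 : (PySem.List.pyGet? [((-3:Int),(0:Int)),(-2,0),(-1,0),(1,0),(2,0),(3,0),(0,-3),(0,-2),(0,-1),(0,1),(0,2),(0,3)] (-9:Int)) = some (1, 0) := by decide
    have h2 : (PySem.List.pyGet? pvTRANS (-9:Int)) = some [(1, 1, 0, 4), (2, 0, -1, 8), (3, 0, 1, 9)] := by decide
    simp only [getNeighbors3, getNeighbors3_alt, h1, h2, Option.getD_some, List.foldl]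
    norm_num
    split_ifs <;> (try norm_num [List.idxOf?, List.findIdx?, List.findIdx?.go]) <;> omega
  · have h1 : (PySem.List.pyGet? [((-3:Int),(0:Int)),(-2,0),(-1,0),(1,0),(2,0),(3,0),(0,-3),(0,-2),(0,-1),(0,1),(0,2),(0,3)] (-8:Int)) = some (2, 0) := by decide
    have h2 : (PySem.List.pyGet? pvTRANS (-8:Int)) = some [(1, 1, 0, 5), (2, 0, -1, 8), (3, 0, 1, 9)] := by decide
    simp only [getNeighbors3, getNeighbors3_alt, h1, h2, Option.getD_some, List.foldl]
    norm_num
    split_ifs <;> (try norm_num [List.idxOf?, List.findIdx?, List.findIdx?.go]) <;> omega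
  · have h1 : (PySem.List.pyGet? [((-3:Int),(0:Int)),(-2,0),(-1,0),(1,0),(2,0),(3,0),(0,-3),(0,-2),(0,-1),(0,1),(0,2),(0,3)] (-7:Int)) = some (3, 0) := by decide
    have h2 : (PySem.List.pyGet? pvTRANS (-7:Int)) = some [(2, 0, -1, 8), (3, 0, 1, 9)] := by decide
    simp only [getNeighbors3, getNeighbors3_alt, h1, h2, Option.getD_some, List.foldl]
    norm_num
    split_ifs <;> (try norm_num [List.idxOf?, List.findIdx?, List.findIdx?.go]) <;> omega
  · have h1 : (PySem.List.pyGet? [((-3:Int),(0:Int)),(-2,0),(-1,0),(1,0),(2,0),(3,0),(0,-3),(0,-2),(0,-1),(0,1),(0,2),(0,3)] (-6:Int)) = some (0, -3) := by decide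
    have h2 : (PySem.List.pyGet? pvTRANS (-6:Int)) = some [(0, -1, 0, 2), (1, 1, 0, 3)] := by decide
    simp only [getNeighbors3, getNeighbors3_alt, h1, h2, Option.getD_some, List.foldl]
    norm_num
    split_ifs <;> (try norm_num [List.idxOf?, List.findIdx?, List.findIdx?.go]) <;> omega
  · have h1 : (PySem.List.pyGet? [((-3:Int),(0:Int)),(-2,0),(-1,0),(1,0),(2,0),(3,0),(0,-3),(0,-2),(0,-1),(0,1),(0,2),(0,3)] (-5:Int)) = some (0, -2) := by decide
    have h2 : (PySem.List.pyGet? pvTRANS (-5:Int)) = some [(0, -1, 0, 2), (1, 1, 0, 3), (2, 0, -1, 6)] := by decide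
    simp only [getNeighbors3, getNeighbors3_alt, h1, h2, Option.getD_some, List.foldl]
    norm_num
    split_ifs <;> (try norm_num [List.idxOf?, List.findIdx?, List.findIdx?.go]) <;> omega
  · have h1 : (PySem.List.pyGet? [((-3:Int),(0:Int)),(-2,0),(-1,0),(1,0),(2,0),(3,0),(0,-3),(0,-2),(0,-1),(0,1),(0,2),(0,3)] (-4:Int)) = some (0, -1) := by decide
    have h2 : (PySem.List.pyGet? pvTRANS (-4:Int)) = some [(0, -1, 0, 2), (1, 1, 0, 3), (2, 0, -1, 7)] := by decide
    simp only [getNeighbors3, getNeighbors3_alt, h1, h2, Option.getD_some, List.foldl]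
    norm_num
    split_ifs <;> (try norm_num [List.idxOf?, List.findIdx?, List.findIdx?.go]) <;> omega
  · have h1 : (PySem.List.pyGet? [((-3:Int),(0:Int)),(-2,0),(-1,0),(1,0),(2,0),(3,0),(0,-3),(0,-2),(0,-1),(0,1),(0,2),(0,3)] (-3:Int)) = some (0, 1) := by decide
    have h2 : (PySem.List.pyGet? pvTRANS (-3:Int)) = some [(0, -1, 0, 2), (1, 1, 0, 3), (3, 0, 1, 10)] := by decide
    simp only [getNeighbors3, getNeighbors3_alt, h1, h2, Option.getD_some, List.foldl]
    norm_num
    split_ifs <;> (try norm_num [List.idxOf?, List.findIdx?, List.findIdx?.go]) <;> omega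
  · have h1 : (PySem.List.pyGet? [((-3:Int),(0:Int)),(-2,0),(-1,0),(1,0),(2,0),(3,0),(0,-3),(0,-2),(0,-1),(0,1),(0,2),(0,3)] (-2:Int)) = some (0, 2) := by decide
    have h2 : (PySem.List.pyGet? pvTRANS (-2:Int)) = some [(0, -1, 0, 2), (1, 1, 0, 3), (3, 0, 1, 11)] := by decide
    simp only [getNeighbors3, getNeighbors3_alt, h1, h2, Option.getD_some, List.foldl]
    norm_num
    split_ifs <;> (try norm_num [List.idxOf?, List.findIdx?, List.findIdx?.go]) <;> omega
  · have h1 : (PySem.List.pyGet? [((-3:Int),(0:Int)),(-2,0),(-1,0),(1,0),(2,0),(3,0),(0,-3),(0,-2),(0,-1),(0,1),(0,2),(0,3)] (-1:Int)) = some (0, 3) := by decide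
    have h2 : (PySem.List.pyGet? pvTRANS (-1:Int)) = some [(0, -1, 0, 2), (1, 1, 0, 3)] := by decide
    simp only [getNeighbors3, getNeighbors3_alt, h1, h2, Option.getD_some, List.foldl]
    norm_num
    split_ifs <;> (try norm_num [List.idxOf?, List.findIdx?, List.findIdx?.go]) <;> omega
  · have h1 : (PySem.List.pyGet? [((-3:Int),(0:Int)),(-2,0),(-1,0),(1,0),(2,0),(3,0),(0,-3),(0,-2),(0,-1),(0,1),(0,2),(0,3)] (0:Int)) = some (-3, 0) := by decide
    have h2 : (PySem.List.pyGet? pvTRANS (0:Int)) = some [(2, 0, -1, 8), (3, 0, 1, 9)] := by decide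
    simp only [getNeighbors3, getNeighbors3_alt, h1, h2, Option.getD_some, List.foldl]
    norm_num
    split_ifs <;> (try norm_num [List.idxOf?, List.findIdx?, List.findIdx?.go]) <;> omega
  · have h1 : (PySem.List.pyGet? [((-3:Int),(0:Int)),(-2,0),(-1,0),(1,0),(2,0),(3,0),(0,-3),(0,-2),(0,-1),(0,1),(0,2),(0,3)] (1:Int)) = some (-2, 0) := by decide
    have h2 : (PySem.List.pyGet? pvTRANS (1:Int)) = some [(0, -1, 0, 0), (2, 0, -1, 8), (3, 0, 1, 9)] := by decide
    simp only [getNeighbors3, getNeighbors3_alt, h1, h2, Option.getD_some, List.foldl]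
    norm_num
    split_ifs <;> (try norm_num [List.idxOf?, List.findIdx?, List.findIdx?.go]) <;> omega
  · have h1 : (PySem.List.pyGet? [((-3:Int),(0:Int)),(-2,0),(-1,0),(1,0),(2,0),(3,0),(0,-3),(0,-2),(0,-1),(0,1),(0,2),(0,3)] (2:Int)) = some (-1, 0) := by decide
    have h2 : (PySem.List.pyGet? pvTRANS (2:Int)) = some [(0, -1, 0, 1), (2, 0, -1, 8), (3, 0, 1, 9)] := by decide
    simp only [getNeighbors3, getNeighbors3_alt, h1, h2, Option.getD_some, List.foldl]
    norm_num
    split_ifs <;> (try norm_num [List.idxOf?, List.findIdx?, List.findIdx?.go]) <;> omega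
  · have h1 : (PySem.List.pyGet? [((-3:Int),(0:Int)),(-2,0),(-1,0),(1,0),(2,0),(3,0),(0,-3),(0,-2),(0,-1),(0,1),(0,2),(0,3)] (3:Int)) = some (1, 0) := by decide
    have h2 : (PySem.List.pyGet? pvTRANS (3:Int)) = some [(1, 1, 0, 4), (2, 0, -1, 8), (3, 0, 1, 9)] := by decide
    simp only [getNeighbors3, getNeighbors3_alt, h1, h2, Option.getD_some, List.foldl]
    norm_num
    split_ifs <;> (try norm_num [List.idxOf?, List.findIdx?, List.findIdx?.go]) <;> omega
  · have h1 : (PySem.List.pyGet? [((-3:Int),(0:Int)),(-2,0),(-1,0),(1,0),(2,0),(3,0),(0,-3),(0,-2),(0,-1),(0,1),(0,2),(0,3)] (4:Int)) = some (2, 0) := by decide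
    have h2 : (PySem.List.pyGet? pvTRANS (4:Int)) = some [(1, 1, 0, 5), (2, 0, -1, 8), (3, 0, 1, 9)] := by decide
    simp only [getNeighbors3, getNeighbors3_alt, h1, h2, Option.getD_some, List.foldl]
    norm_num
    split_ifs <;> (try norm_num [List.idxOf?, List.findIdx?, List.findIdx?.go]) <;> omega
  · have h1 : (PySem.List.pyGet? [((-3:Int),(0:Int)),(-2,0),(-1,0),(1,0),(2,0),(3,0),(0,-3),(0,-2),(0,-1),(0,1),(0,2),(0,3)] (5:Int)) = some (3, 0) := by decide
    have h2 : (PySem.List.pyGet? pvTRANS (5:Int)) = some [(2, 0, -1, 8), (3, 0, 1, 9)] := by decide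
    simp only [getNeighbors3, getNeighbors3_alt, h1, h2, Option.getD_some, List.foldl]
    norm_num
    split_ifs <;> (try norm_num [List.idxOf?, List.findIdx?, List.findIdx?.go]) <;> omega
  · have h1 : (PySem.List.pyGet? [((-3:Int),(0:Int)),(-2,0),(-1,0),(1,0),(2,0),(3,0),(0,-3),(0,-2),(0,-1),(0,1),(0,2),(0,3)] (6:Int)) = some (0, -3) := by decide
    have h2 : (PySem.List.pyGet? pvTRANS (6:Int)) = some [(0, -1, 0, 2), (1, 1, 0, 3)] := by decide
    simp only [getNeighbors3, getNeighbors3_alt, h1, h2, Option.getD_some, List.foldl]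
    norm_num
    split_ifs <;> (try norm_num [List.idxOf?, List.findIdx?, List.findIdx?.go]) <;> omega
  · have h1 : (PySem.List.pyGet? [((-3:Int),(0:Int)),(-2,0),(-1,0),(1,0),(2,0),(3,0),(0,-3),(0,-2),(0,-1),(0,1),(0,2),(0,3)] (7:Int)) = some (0, -2) := by decide
    have h2 : (PySem.List.pyGet? pvTRANS (7:Int)) = some [(0, -1, 0, 2), (1, 1, 0, 3), (2, 0, -1, 6)] := by decide
    simp only [getNeighbors3, getNeighbors3_alt, h1, h2, Option.getD_some, List.foldl]
    norm_num
    split_ifs <;> (try norm_num [List.idxOf?, List.findIdx?, List.findIdx?.go]) <;> omega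
  · have h1 : (PySem.List.pyGet? [((-3:Int),(0:Int)),(-2,0),(-1,0),(1,0),(2,0),(3,0),(0,-3),(0,-2),(0,-1),(0,1),(0,2),(0,3)] (8:Int)) = some (0, -1) := by decide
    have h2 : (PySem.List.pyGet? pvTRANS (8:Int)) = some [(0, -1, 0, 2), (1, 1, 0, 3), (2, 0, -1, 7)] := by decide
    simp only [getNeighbors3, getNeighbors3_alt, h1, h2, Option.getD_some, List.foldl]
    norm_num
    split_ifs <;> (try norm_num [List.idxOf?, List.findIdx?, List.findIdx?.go]) <;> omega
  · have h1 : (PySem.List.pyGet? [((-3:Int),(0:Int)),(-2,0),(-1,0),(1,0),(2,0),(3,0),(0,-3),(0,-2),(0,-1),(0,1),(0,2),(0,3)] (9:Int)) = some (0, 1) := by decide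
    have h2 : (PySem.List.pyGet? pvTRANS (9:Int)) = some [(0, -1, 0, 2), (1, 1, 0, 3), (3, 0, 1, 10)] := by decide
    simp only [getNeighbors3, getNeighbors3_alt, h1, h2, Option.getD_some, List.foldl]
    norm_num
    split_ifs <;> (try norm_num [List.idxOf?, List.findIdx?, List.findIdx?.go]) <;> omega
  · have h1 : (PySem.List.pyGet? [((-3:Int),(0:Int)),(-2,0),(-1,0),(1,0),(2,0),(3,0),(0,-3),(0,-2),(0,-1),(0,1),(0,2),(0,3)] (10:Int)) = some (0, 2) := by decide
    have h2 : (PySem.List.pyGet? pvTRANS (10:Int)) = some [(0, -1, 0, 2), (1, 1, 0, 3), (3, 0, 1, 11)] := by decide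
    simp only [getNeighbors3, getNeighbors3_alt, h1, h2, Option.getD_some, List.foldl]
    norm_num
    split_ifs <;> (try norm_num [List.idxOf?, List.findIdx?, List.findIdx?.go]) <;> omega
  · have h1 : (PySem.List.pyGet? [((-3:Int),(0:Int)),(-2,0),(-1,0),(1,0),(2,0),(3,0),(0,-3),(0,-2),(0,-1),(0,1),(0,2),(0,3)] (11:Int)) = some (0, 3) := by decide
    have h2 : (PySem.List.pyGet? pvTRANS (11:Int)) = some [(0, -1, 0, 2), (1, 1, 0, 3)] := by decide
    simp only [getNeighbors3, getNeighbors3_alt, h1, h2, Option.getD_some, List.foldl]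
    norm_num
    split_ifs <;> (try norm_num [List.idxOf?, List.findIdx?, List.findIdx?.go]) <;> omega
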